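-- pv_equiv track=rewrite | github.com/FiniteStateInc/customer-resources | 01-onboarding-and-scanning/utilities/manage_users.py | user_matches_exclusion
-- ===== SOURCE A (Python) =====
-- from typing import List, Optional, Tuple
--
-- def user_matches_exclusion(user: dict, exclusions: List[str]) -> bool:
--     """Check if a user matches any exclusion pattern.
--
--     Args:
--         user: User dictionary
--         exclusions: List of exclusion patterns. Can be:
--             - Email domain (e.g., "@finitestate.io", "@example.com")
--             - Full email address (e.g., "admin@example.com")
--             - User ID (e.g., "user123")
--
--     Returns:
--         True if user matches any exclusion pattern, False otherwise
--     """
--     if not exclusions: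
--         return False
--
--     email = user.get("email", "").lower()
--     user_id = user.get("userId", "").lower()
--
--     for exclusion in exclusions:
--         exclusion_lower = exclusion.lower().strip()
--
--         # Check full email match
--         if exclusion_lower == email:
--             return True
--
--         # Check email domain match (starts with @)
--         if exclusion_lower.startswith("@"):
--             if email.endswith(exclusion_lower):
--                 return True
--
--         # Check user ID match
--         if exclusion_lower == user_id:
--             return True
--
--     return False
-- ===== SOURCE B (Python) =====
-- from typing import List
--
-- def user_matches_exclusion(user: dict, exclusions: List[str]) -> bool:
--     """Inverted lookup: instead of scanning each pattern against the user,
--     generate the candidate keys FROM the user (exact email, exact userId,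
--     and every suffix of the email that starts at an '@') and look each one
--     up in a set of normalized exclusion patterns."""
--     email = user.get("email", "").lower()
--     user_id = user.get("userId", "").lower()
--     excl = {e.lower().strip() for e in exclusions}
--     if email in excl or user_id in excl:
--         return True
--     return any(email[i:] in excl for i, c in enumerate(email) if c == '@')
-- ===== Notes on version B (the rewrite author's own statement) =====
-- stated objective: alternative
-- what changed: Inverts the matching direction: instead of scanning each exclusion pattern and testing it against the user (A's three-branch loop), B builds a set of normalized patterns once and generates the candidate keys from the user itself - the email, the userId, and each suffix of the email starting at an '@' - looking each up by set membership, so no per-pattern suffix test remains.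
import Mathlib
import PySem

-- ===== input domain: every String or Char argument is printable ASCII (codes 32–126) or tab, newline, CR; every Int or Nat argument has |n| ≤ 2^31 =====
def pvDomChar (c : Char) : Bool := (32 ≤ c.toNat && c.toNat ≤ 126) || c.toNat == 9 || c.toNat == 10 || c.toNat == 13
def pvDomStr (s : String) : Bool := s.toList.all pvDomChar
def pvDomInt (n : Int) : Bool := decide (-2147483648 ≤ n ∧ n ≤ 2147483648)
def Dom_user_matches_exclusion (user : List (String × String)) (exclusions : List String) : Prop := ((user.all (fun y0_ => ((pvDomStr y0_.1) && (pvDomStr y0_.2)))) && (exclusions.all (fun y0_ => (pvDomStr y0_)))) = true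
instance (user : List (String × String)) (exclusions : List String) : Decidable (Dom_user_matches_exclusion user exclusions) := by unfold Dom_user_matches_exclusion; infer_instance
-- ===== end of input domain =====

-- B inverts the matching direction: it builds a set of normalized patterns once and
-- generates candidate keys FROM the user (email, userId, each '@'-suffix of the email),
-- looking each up by membership — no per-pattern suffix scan; alternative algorithm.

-- normalization '.lower().strip()'
def pvNorm (e : String) : String := PySem.Str.strip (PySem.Str.lower e)

-- ===== PORT A =====
-- A's for-loop over exclusions, branches in A's order
def pvLoopA (email user_id : String) : List String → Bool
  | [] => false
  | exclusion :: rest =>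
    let exclusion_lower := PySem.Str.strip (PySem.Str.lower exclusion)
    if exclusion_lower == email then true
    else if PySem.Str.startswith exclusion_lower "@" &&
            PySem.Str.endswith email exclusion_lower then true
    else if exclusion_lower == user_id then true
    else pvLoopA email user_id rest

def user_matches_exclusion (user : List (String × String)) (exclusions : List String) : Bool :=
  if exclusions.isEmpty then false
  else
    let email := PySem.Str.lower (PySem.Dict.getD ⟨user⟩ "email" "")
    let user_id := PySem.Str.lower (PySem.Dict.getD ⟨user⟩ "userId" "")
    pvLoopA email user_id exclusions

-- ===== PORT B =====
def user_matches_exclusion_alt (user : List (String × String)) (exclusions : List String) : Bool :=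
  let email := PySem.Str.lower (PySem.Dict.getD ⟨user⟩ "email" "")
  let user_id := PySem.Str.lower (PySem.Dict.getD ⟨user⟩ "userId" "")
  let excl := PySem.Set.ofList (exclusions.map pvNorm)
  if PySem.Set.contains excl email || PySem.Set.contains excl user_id then true
  else
    (PySem.List.enumerate email.toList 0).any
      (fun p => p.2 == '@' && PySem.Set.contains excl (PySem.Str.slice email (some p.1) none))

-- ===== PRECONDITION & SPEC =====
def Spec_user_matches_exclusion (user : List (String × String)) (exclusions : List String) (out : Bool) : Prop := out = user_matches_exclusion_alt user exclusions
instance (user : List (String × String)) (exclusions : List String) (out : Bool) : Decidable (Spec_user_matches_exclusion user exclusions out) := by unfold Spec_user_matches_exclusion; infer_instance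

-- ===== CLAIM (what is proved, stated in full; the proofs are below) =====
def Claim_equal_user_matches_exclusion : Prop := ∀ (user : List (String × String)) (exclusions : List String), Dom_user_matches_exclusion user exclusions → Spec_user_matches_exclusion user exclusions (user_matches_exclusion user exclusions)

-- ===== LEMMAS AND PROOFS =====

lemma pvLoopA_iff (email user_id : String) (l : List String) :
    pvLoopA email user_id l = true ↔
      ∃ e ∈ l, pvNorm e = email ∨
        (PySem.Str.startswith (pvNorm e) "@" = true ∧
         PySem.Str.endswith email (pvNorm e) = true) ∨
        pvNorm e = user_id := by
  induction l with
  | nil => simp [pvLoopA]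
  | cons x rest ih =>
    simp only [pvLoopA]
    show (if (pvNorm x == email) = true then true
      else if (PySem.Str.startswith (pvNorm x) "@" && PySem.Str.endswith email (pvNorm x)) = true then true
      else if (pvNorm x == user_id) = true then true
      else pvLoopA email user_id rest) = true ↔ _
    split_ifs with h1 h2 h3
    · simp only [true_iff]
      exact ⟨x, List.mem_cons_self, Or.inl (eq_of_beq h1)⟩
    · simp only [true_iff]
      exact ⟨x, List.mem_cons_self, Or.inr (Or.inl (by rw [Bool.and_eq_true] at h2; exact h2))⟩
    · simp only [true_iff]
      exact ⟨x, List.mem_cons_self, Or.inr (Or.inr (eq_of_beq h3))⟩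
    · rw [ih]
      constructor
      · rintro ⟨e, he, hp⟩; exact ⟨e, List.mem_cons_of_mem _ he, hp⟩
      · rintro ⟨e, he, hp⟩
        rcases List.mem_cons.mp he with rfl | hmem
        · exfalso
          rcases hp with h | ⟨hs, hee⟩ | h
          · exact h1 (beq_of_eq h)
          · exact h2 (by rw [Bool.and_eq_true]; exact ⟨hs, hee⟩)
          · exact h3 (beq_of_eq h)
        · exact ⟨e, hmem, hp⟩

lemma contains_norm_iff (exclusions : List String) (x : String) :
    PySem.Set.contains (PySem.Set.ofList (exclusions.map pvNorm)) x = true ↔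
      ∃ e ∈ exclusions, pvNorm e = x := by
  rw [PySem.Set.contains_iff, PySem.Set.mem_ofList]
  simp [List.mem_map]

-- a nonempty suffix starting with '@' is exactly the drop at an '@' position
lemma at_suffix_iff (l d : List Char) :
    (['@'] <+: d ∧ d <:+ l) ↔
      ∃ k, ∃ _ : k < l.length, l[k] = '@' ∧ l.drop k = d := by
  constructor
  · rintro ⟨⟨t, hpre⟩, ⟨pre, hsuf⟩⟩
    have hd : d ≠ [] := by rw [← hpre]; simp
    have hlen : l.length = pre.length + d.length := by rw [← hsuf]; simp
    have hdl : 0 < d.length := List.length_pos_of_ne_nil hd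
    have hk : pre.length < l.length := by omega
    refine ⟨pre.length, hk, ?_, ?_⟩
    · have h1 : l[pre.length]? = d[0]? := by
        rw [← hsuf]; rw [List.getElem?_append_right (by omega)]; simp
      have h0 : d[0]? = some '@' := by rw [← hpre]; simp
      exact Option.some_injective _ (by rw [← List.getElem?_eq_getElem hk]; exact h1.trans h0)
    · rw [← hsuf, List.drop_left]
  · rintro ⟨k, hk, hat, hdrop⟩
    refine ⟨⟨(l.drop k).tail, ?_⟩, hdrop ▸ List.drop_suffix k l⟩
    have : l.drop k = l[k] :: (l.drop k).tail := by
      rw [List.drop_eq_getElem_cons hk]; simp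
    rw [← hdrop, this, hat]
    simp

lemma domain_branch_iff (email : String) (exclusions : List String) :
    (∃ e ∈ exclusions, PySem.Str.startswith (pvNorm e) "@" = true ∧
        PySem.Str.endswith email (pvNorm e) = true) ↔
      ∃ k, ∃ _ : k < email.toList.length, email.toList[k] = '@' ∧
        ∃ e ∈ exclusions, pvNorm e = PySem.Str.slice email (some (k : Int)) none := by
  have hslice : ∀ k : Nat, (PySem.Str.slice email (some (k : Int)) none).toList
      = email.toList.drop k := by
    intro k
    rw [PySem.Str.toList_slice]
    simp [PySem.Chars.slice_eq_listSlice, PySem.List.slice_from_natCast]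
  constructor
  · rintro ⟨e, he, hs, hee⟩
    rw [PySem.Str.startswith_eq, PySem.Chars.startswith_iff] at hs
    rw [PySem.Str.endswith_eq, PySem.Chars.endswith_iff] at hee
    have hs' : ['@'] <+: (pvNorm e).toList := by simpa using hs
    obtain ⟨k, hk, hat, hdrop⟩ := (at_suffix_iff email.toList (pvNorm e).toList).mp ⟨hs', hee⟩
    refine ⟨k, hk, hat, e, he, ?_⟩
    apply String.toList_injective
    rw [hslice k, hdrop]
  · rintro ⟨k, hk, hat, e, he, hne⟩
    have hdrop : (pvNorm e).toList = email.toList.drop k := by rw [hne, hslice k]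
    have := (at_suffix_iff email.toList (pvNorm e).toList).mpr ⟨k, hk, hat, hdrop.symm⟩
    refine ⟨e, he, ?_, ?_⟩
    · rw [PySem.Str.startswith_eq, PySem.Chars.startswith_iff]; simpa using this.1
    · rw [PySem.Str.endswith_eq, PySem.Chars.endswith_iff]; exact this.2

lemma alt_core (email user_id : String) (exclusions : List String) :
    (if (PySem.Set.contains (PySem.Set.ofList (exclusions.map pvNorm)) email ||
         PySem.Set.contains (PySem.Set.ofList (exclusions.map pvNorm)) user_id) then true
     else (PySem.List.enumerate email.toList 0).any
        (fun p => p.2 == '@' &&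
          PySem.Set.contains (PySem.Set.ofList (exclusions.map pvNorm))
            (PySem.Str.slice email (some p.1) none))) = true ↔
      (∃ e ∈ exclusions, pvNorm e = email) ∨
      (∃ e ∈ exclusions, pvNorm e = user_id) ∨
      (∃ e ∈ exclusions, PySem.Str.startswith (pvNorm e) "@" = true ∧
        PySem.Str.endswith email (pvNorm e) = true) := by
  rw [domain_branch_iff email exclusions]
  split_ifs with h
  · rw [Bool.or_eq_true, contains_norm_iff, contains_norm_iff] at h
    refine ⟨fun _ => ?_, fun _ => rfl⟩
    rcases h with h | h
    · exact Or.inl h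
    · exact Or.inr (Or.inl h)
  · rw [Bool.or_eq_true, contains_norm_iff, contains_norm_iff] at h
    rw [not_or] at h
    rw [List.any_eq_true]
    constructor
    · rintro ⟨p, hp, hcond⟩
      rw [Bool.and_eq_true] at hcond
      obtain ⟨k, hk, rfl⟩ := (PySem.List.mem_enumerate_iff _ _ _).mp hp
      have hat : email.toList[k] = '@' := by
        have := hcond.1; simpa using eq_of_beq this
      have := (contains_norm_iff exclusions _).mp hcond.2
      exact Or.inr (Or.inr ⟨k, hk, hat, by simpa using this⟩)
    · rintro (hecase | hucase | ⟨k, hk, hat, e, he, hne⟩)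
      · exact absurd hecase h.1
      · exact absurd hucase h.2
      · refine ⟨((0 : Int) + (k : Int), email.toList[k]), ?_, ?_⟩
        · exact (PySem.List.mem_enumerate_iff _ _ _).mpr ⟨k, hk, rfl⟩
        · rw [Bool.and_eq_true]
          constructor
          · simp [hat]
          · rw [contains_norm_iff]
            exact ⟨e, he, by simpa using hne⟩

lemma alt_iff (user : List (String × String)) (exclusions : List String) :
    user_matches_exclusion_alt user exclusions = true ↔
      (∃ e ∈ exclusions, pvNorm e = PySem.Str.lower (PySem.Dict.getD ⟨user⟩ "email" "")) ∨
      (∃ e ∈ exclusions, pvNorm e = PySem.Str.lower (PySem.Dict.getD ⟨user⟩ "userId" "")) ∨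
      (∃ e ∈ exclusions, PySem.Str.startswith (pvNorm e) "@" = true ∧
        PySem.Str.endswith (PySem.Str.lower (PySem.Dict.getD ⟨user⟩ "email" "")) (pvNorm e) = true) := by
  exact alt_core (PySem.Str.lower (PySem.Dict.getD ⟨user⟩ "email" ""))
    (PySem.Str.lower (PySem.Dict.getD ⟨user⟩ "userId" "")) exclusions

-- ===== VERDICT (by name: the statement is the Claim_ definition above) =====
theorem user_matches_exclusion_spec : Claim_equal_user_matches_exclusion := by
  intro user exclusions _
  unfold Spec_user_matches_exclusion
  rw [Bool.eq_iff_iff, alt_iff]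
  unfold user_matches_exclusion
  split_ifs with hempty
  · rw [List.isEmpty_iff.mp hempty]
    simp
  · rw [pvLoopA_iff]
    constructor
    · rintro ⟨e, he, h | h | h⟩
      · exact Or.inl ⟨e, he, h⟩
      · exact Or.inr (Or.inr ⟨e, he, h⟩)
      · exact Or.inr (Or.inl ⟨e, he, h⟩)
    · rintro (⟨e, he, h⟩ | ⟨e, he, h⟩ | ⟨e, he, h⟩)
      · exact ⟨e, he, Or.inl h⟩
      · exact ⟨e, he, Or.inr (Or.inr h)⟩
      · exact ⟨e, he, Or.inr (Or.inl h)⟩
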